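-- pv_equiv track=rewrite | github.com/CaptPyrite/word-solver | solver.py | find_letters_in_list
-- ===== SOURCE A (Python) =====
-- def find_letters_in_list(lst,word):
--     c_in = 0
--     Out_ = []
--     for e,i in enumerate(lst):
--         try:
--
--             if i == word[c_in]:
--                 c_in += 1
--                 Out_.append(e)
--
--             else:
--                 pass
--
--         except IndexError:
--             pass
--     return(Out_)
-- ===== SOURCE B (Python) =====
-- def find_letters_in_list(lst, word):
--     out = []
--     pos = 0
--     for ch in word:
--         try:
--             idx = lst.index(ch, pos)
--         except ValueError:
--             break
--         out.append(idx)
--         pos = idx + 1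
--     return out
-- ===== Notes on version B (the rewrite author's own statement) =====
-- stated objective: alternative
-- what changed: B loops over the characters of word with a cursor into lst, using lst.index(ch, pos) to find each next match and breaking on the first miss, instead of A's single enumerate pass over lst with a counter into word and a try/except IndexError per element.
import Mathlib
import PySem

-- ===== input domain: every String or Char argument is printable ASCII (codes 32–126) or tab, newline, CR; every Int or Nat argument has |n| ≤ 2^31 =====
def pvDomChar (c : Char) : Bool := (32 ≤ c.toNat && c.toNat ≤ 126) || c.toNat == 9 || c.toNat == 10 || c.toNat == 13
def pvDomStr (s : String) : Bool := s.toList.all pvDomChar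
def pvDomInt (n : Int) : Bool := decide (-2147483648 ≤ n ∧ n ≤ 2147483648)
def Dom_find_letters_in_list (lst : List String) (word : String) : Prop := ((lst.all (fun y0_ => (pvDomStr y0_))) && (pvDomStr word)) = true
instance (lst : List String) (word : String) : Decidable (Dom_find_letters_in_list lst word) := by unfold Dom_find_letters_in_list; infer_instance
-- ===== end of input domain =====

-- B replaces A's single enumerate pass over lst (counter into word, try/except IndexError)
-- by an outer loop over word's characters with a cursor into lst and an inner index search;
-- alternative decomposition, not claimed faster.

-- ===== PORT A =====
-- state (e, c_in, Out_); 'for e,i in enumerate(lst)' carried as e in the fold state;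
-- word[c_in] = PySem.Str.pyGet? (none = IndexError → pass branch)
def find_letters_in_list (lst : List String) (word : String) : List Int :=
  (lst.foldl (fun (st : Int × Int × List Int) (i : String) =>
      match PySem.Str.pyGet? word st.2.1 with
      | none => (st.1 + 1, st.2.1, st.2.2)                 -- except IndexError: pass
      | some c =>
        if i = String.singleton c then (st.1 + 1, st.2.1 + 1, st.2.2 ++ [st.1])
        else (st.1 + 1, st.2.1, st.2.2))
    (0, 0, [])).2.2

-- ===== PORT B =====
-- lst.index(ch, pos): first index ≥ pos whose element equals the 1-char string; none = ValueError.
-- Hand port (exact for pos ≥ 0, which is the only way B calls it): scan with a running index i,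
-- accepting a match only when pos ≤ i.
def findIdxFrom : List String → Int → Int → String → Option Int
  | [], _, _, _ => none
  | x :: xs, i, pos, s => if pos ≤ i ∧ x = s then some i else findIdxFrom xs (i + 1) pos s

-- the outer 'for ch in word' loop with cursor pos; break = return the list built so far
def bGo (lst : List String) : List Char → Int → List Int
  | [], _ => []
  | c :: ws, pos =>
    match findIdxFrom lst 0 pos (String.singleton c) with
    | none => []                                           -- except ValueError: break
    | some idx => idx :: bGo lst ws (idx + 1)

def find_letters_in_list_alt (lst : List String) (word : String) : List Int :=
  bGo lst word.toList 0

-- ===== PRECONDITION & SPEC =====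
def Spec_find_letters_in_list (lst : List String) (word : String) (out : List Int) : Prop := out = find_letters_in_list_alt lst word
instance (lst : List String) (word : String) (out : List Int) : Decidable (Spec_find_letters_in_list lst word out) := by unfold Spec_find_letters_in_list; infer_instance

-- ===== CLAIM (what is proved, stated in full; the proofs are below) =====
def Claim_equal_find_letters_in_list : Prop := ∀ (lst : List String) (word : String), Dom_find_letters_in_list lst word → Spec_find_letters_in_list lst word (find_letters_in_list lst word)

-- ===== LEMMAS AND PROOFS =====

-- A's pass described as recursion over lst with the remaining word characters
def aLoop : List String → Int → List Char → List Int
  | [], _, _ => []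
  | _ :: xs, e, [] => aLoop xs (e + 1) []
  | x :: xs, e, c :: ws =>
    if x = String.singleton c then e :: aLoop xs (e + 1) ws
    else aLoop xs (e + 1) (c :: ws)

theorem aLoop_nil_word : ∀ (xs : List String) (e : Int), aLoop xs e [] = [] := by
  intro xs
  induction xs with
  | nil => intro e; rfl
  | cons x xs ih => intro e; simp [aLoop, ih]

theorem foldA_eq (word : String) :
    ∀ (xs : List String) (e : Int) (k : Nat) (out : List Int),
      (xs.foldl (fun (st : Int × Int × List Int) (i : String) =>
          match PySem.Str.pyGet? word st.2.1 with
          | none => (st.1 + 1, st.2.1, st.2.2)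
          | some c =>
            if i = String.singleton c then (st.1 + 1, st.2.1 + 1, st.2.2 ++ [st.1])
            else (st.1 + 1, st.2.1, st.2.2))
        (e, (k : Int), out)).2.2 = out ++ aLoop xs e (word.toList.drop k) := by
  intro xs
  induction xs with
  | nil => intro e k out; simp [aLoop]
  | cons x xs ih =>
    intro e k out
    have hget : PySem.Str.pyGet? word (k : Int) = word.toList[k]? := by
      simp
    have hhead : (word.toList.drop k).head? = word.toList[k]? := List.head?_drop
    cases hdk : word.toList.drop k with
    | nil =>
      have hnone : PySem.Str.pyGet? word (k : Int) = none := by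
        rw [hget, ← hhead, hdk]; rfl
      simp only [List.foldl_cons, hnone]
      rw [ih (e + 1) k out, hdk]
      simp [aLoop]
    | cons c t =>
      have hsome : PySem.Str.pyGet? word (k : Int) = some c := by
        rw [hget, ← hhead, hdk]; rfl
      have hdk1 : word.toList.drop (k + 1) = t := by
        rw [← List.tail_drop, hdk]
        rfl
      by_cases hx : x = String.singleton c
      · simp only [List.foldl_cons, hsome]
        rw [if_pos hx]
        have hc : ((k : Int) + 1) = ((k + 1 : Nat) : Int) := by push_cast; ring
        rw [hc, ih (e + 1) (k + 1) (out ++ [e]), hdk1]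
        simp [aLoop, hx]
      · simp only [List.foldl_cons, hsome]
        rw [if_neg hx]
        rw [ih (e + 1) k out, hdk]
        simp [aLoop, hx]

theorem findIdxFrom_mono (s : String) :
    ∀ (xs : List String) (i p q : Int), p ≤ i → q ≤ i →
      findIdxFrom xs i p s = findIdxFrom xs i q s := by
  intro xs
  induction xs with
  | nil => intro i p q _ _; rfl
  | cons x xs ih =>
    intro i p q hp hq
    by_cases hx : x = s
    · simp [findIdxFrom, hp, hq, hx]
    · simp only [findIdxFrom, hx, and_false, if_false]
      exact ih (i + 1) p q (by omega) (by omega)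

theorem findIdxFrom_add (s : String) :
    ∀ (xs : List String) (i p t : Int),
      findIdxFrom xs (i + t) (p + t) s = (findIdxFrom xs i p s).map (· + t) := by
  intro xs
  induction xs with
  | nil => intro i p t; rfl
  | cons x xs ih =>
    intro i p t
    by_cases hpi : p ≤ i
    · by_cases hx : x = s
      · simp [findIdxFrom, hpi, hx]
      · simp only [findIdxFrom, hx, and_false, if_false]
        have : i + t + 1 = (i + 1) + t := by ring
        rw [this, ih (i + 1) p t]
    · have h2 : ¬ (p + t ≤ i + t) := by omega
      simp only [findIdxFrom, hpi, h2, false_and, if_false]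
      have : i + t + 1 = (i + 1) + t := by ring
      rw [this, ih (i + 1) p t]

theorem findIdxFrom_prefix (s : String) :
    ∀ (P xs : List String),
      findIdxFrom (P ++ xs) 0 (P.length : Int) s
        = (findIdxFrom xs 0 0 s).map (· + (P.length : Int)) := by
  intro P
  induction P with
  | nil => intro xs; simp
  | cons p P ih =>
    intro xs
    have hlen : (((p :: P).length : Nat) : Int) = (P.length : Int) + 1 := by
      push_cast [List.length_cons]; ring
    have hskip : ¬ ((((p :: P).length : Nat) : Int) ≤ (0 : Int)) := by
      rw [hlen]; omega
    simp only [List.cons_append, findIdxFrom, hskip, false_and, if_false]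
    calc findIdxFrom (P ++ xs) (0 + 1) (((p :: P).length : Nat) : Int) s
        = findIdxFrom (P ++ xs) (0 + 1) ((P.length : Int) + 1) s := by rw [hlen]
      _ = (findIdxFrom (P ++ xs) 0 (P.length : Int) s).map (· + 1) :=
          findIdxFrom_add s (P ++ xs) 0 (P.length : Int) 1
      _ = ((findIdxFrom xs 0 0 s).map (· + (P.length : Int))).map (· + 1) := by rw [ih xs]
      _ = (findIdxFrom xs 0 0 s).map (· + (((p :: P).length : Nat) : Int)) := by
          cases findIdxFrom xs 0 0 s with
          | none => rfl
          | some a => simp; ring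

theorem main_eq :
    ∀ (xs P : List String) (ws : List Char),
      aLoop xs (P.length : Int) ws = bGo (P ++ xs) ws (P.length : Int) := by
  intro xs
  induction xs with
  | nil =>
    intro P ws
    cases ws with
    | nil => simp [aLoop, bGo]
    | cons c ws =>
      have h := findIdxFrom_prefix (String.singleton c) P []
      simp only [aLoop, bGo]
      rw [h]; rfl
  | cons x xs ih =>
    intro P ws
    cases ws with
    | nil => simp [aLoop, bGo, aLoop_nil_word]
    | cons c ws =>
      have hP1 : (((P ++ [x]).length : Nat) : Int) = (P.length : Int) + 1 := by
        simp
      by_cases hx : x = String.singleton c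
      · have hfind : findIdxFrom (P ++ x :: xs) 0 (P.length : Int) (String.singleton c)
            = some (P.length : Int) := by
          rw [findIdxFrom_prefix]
          simp [findIdxFrom, hx]
        have hIH := ih (P ++ [x]) ws
        rw [hP1] at hIH
        simp only [aLoop, bGo, hfind]
        rw [if_pos hx, hIH]
        simp
      · have e1 : findIdxFrom (x :: xs) 0 0 (String.singleton c)
            = findIdxFrom xs 1 0 (String.singleton c) := by
          simp [findIdxFrom, hx]
        have e2 : findIdxFrom xs 1 0 (String.singleton c)
            = findIdxFrom xs 1 1 (String.singleton c) :=
          findIdxFrom_mono (String.singleton c) xs 1 0 1 (by omega) (by omega)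
        have e3 : findIdxFrom xs 1 1 (String.singleton c)
            = (findIdxFrom xs 0 0 (String.singleton c)).map (· + 1) := by
          simpa using findIdxFrom_add (String.singleton c) xs 0 0 1
        have hfind : findIdxFrom ((P ++ [x]) ++ xs) 0 (((P ++ [x]).length : Nat) : Int) (String.singleton c)
            = findIdxFrom (P ++ x :: xs) 0 (P.length : Int) (String.singleton c) := by
          rw [findIdxFrom_prefix, findIdxFrom_prefix, e1, e2, e3, Option.map_map]
          cases findIdxFrom xs 0 0 (String.singleton c) with
          | none => rfl
          | some a => simp; ring
        have hIH := ih (P ++ [x]) (c :: ws)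
        rw [hP1] at hIH
        simp only [aLoop]
        rw [if_neg hx, hIH]
        simp only [bGo]
        rw [← hP1, hfind]
        simp only [List.append_assoc, List.singleton_append]

theorem find_letters_in_list_eq_aLoop (lst : List String) (word : String) :
    find_letters_in_list lst word = aLoop lst 0 word.toList := by
  unfold find_letters_in_list
  have h := foldA_eq word lst 0 0 []
  simpa using h

-- ===== VERDICT (by name: the statement is the Claim_ definition above) =====
theorem find_letters_in_list_spec : Claim_equal_find_letters_in_list := by
  intro lst word _
  unfold Spec_find_letters_in_list find_letters_in_list_alt
  rw [find_letters_in_list_eq_aLoop]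
  have h := main_eq lst [] word.toList
  simpa using h
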